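-- pv_equiv track=rewrite | github.com/owainkenwayucl/miscell | miscellc.py | validadd
-- ===== SOURCE A (Python) =====
-- import string, sys, shlex
--
-- letters=list(string.ascii_uppercase)
--
-- numbers='0123456789'
--
-- def validadd(addr):
--   upaddr=addr.upper().strip()
--   left=''
--   right=''
--   stop=False
-- # split at first nonletter
--   for a in upaddr:
--     if a in letters and not stop:
--       left = left + a
--     else:
--       stop = True
--       right = right + a
--
--   isLetter=(len(left) > 0)
--
--
--   isNumber=True
--   for b in right:
--     if b not in numbers:
--       isNumber=False
--   if len(right)==0:
--     isNumber=False
--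
--   return (isLetter and isNumber)
-- ===== SOURCE B (Python) =====
-- def validadd(addr):
--   s = addr.upper().strip()
--   head = s.rstrip('0123456789')
--   return 0 < len(head) < len(s) and head.isalpha()
-- ===== Notes on version B (the rewrite author's own statement) =====
-- stated objective: idiomatic
-- what changed: Instead of A's forward character loop that accumulates a left/right split with a stop flag plus a second digit-checking loop, B works back-to-front with library string operations: it strips the maximal digit suffix with rstrip over the digit characters and validates the remainder with one isalpha call plus a chained length comparison.
import Mathlib
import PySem

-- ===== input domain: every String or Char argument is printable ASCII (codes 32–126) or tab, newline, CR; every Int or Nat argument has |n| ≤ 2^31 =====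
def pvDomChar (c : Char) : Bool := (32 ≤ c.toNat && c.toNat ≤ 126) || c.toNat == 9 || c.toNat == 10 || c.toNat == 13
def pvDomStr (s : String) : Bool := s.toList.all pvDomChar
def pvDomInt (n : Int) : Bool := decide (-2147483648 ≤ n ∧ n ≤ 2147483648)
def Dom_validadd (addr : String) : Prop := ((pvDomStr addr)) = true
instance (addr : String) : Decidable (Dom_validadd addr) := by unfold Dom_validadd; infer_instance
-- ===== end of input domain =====

-- B replaces A's forward accumulation loop (left/right strings + stop flag) and second digit loop
-- by back-to-front library passes: rstrip the digit suffix, then one isalpha test on the remainder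
-- (idiomatic; return value only, neither version mutates its argument).

-- ===== PORT A =====
-- letters = list(string.ascii_uppercase)
def lettersA : List Char :=
  ['A','B','C','D','E','F','G','H','I','J','K','L','M','N','O','P','Q','R','S','T','U','V','W','X','Y','Z']
-- numbers = '0123456789'
def numbersA : List Char := ['0','1','2','3','4','5','6','7','8','9']

def validadd (addr : String) : Bool :=
  let upaddr := (PySem.Str.strip (PySem.Str.upper addr)).toList
  -- for a in upaddr: if a in letters and not stop: left += a else: stop = True; right += a
  let st := upaddr.foldl
    (fun (st : List Char × List Char × Bool) a =>
      if lettersA.contains a && !st.2.2 then (st.1 ++ [a], st.2.1, st.2.2)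
      else (st.1, st.2.1 ++ [a], true))
    ([], [], false)
  let left := st.1
  let right := st.2.1
  let isLetter := decide (left.length > 0)
  -- for b in right: if b not in numbers: isNumber = False   (b in numbers = substring test on '0123456789')
  let isNumber := right.foldl (fun acc b => if !(PySem.Chars.isIn [b] numbersA) then false else acc) true
  let isNumber := if right.length == 0 then false else isNumber
  isLetter && isNumber

-- ===== PORT B =====
def validadd_alt (addr : String) : Bool :=
  let s := (PySem.Str.strip (PySem.Str.upper addr)).toList
  -- head = s.rstrip('0123456789') : drop from the right while the char is in the set '0'..'9',
  -- which is exactly PySem.Chars.isdigit; rdropWhile is (dropWhile p ∘ reverse) reversed — exact.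
  let head := s.rdropWhile PySem.Chars.isdigit
  -- return 0 < len(head) < len(s) and head.isalpha()
  decide (0 < head.length) && decide (head.length < s.length) && PySem.Chars.strIsalpha head

-- ===== PRECONDITION & SPEC =====
def Spec_validadd (addr : String) (out : Bool) : Prop := out = validadd_alt addr
instance (addr : String) (out : Bool) : Decidable (Spec_validadd addr out) := by unfold Spec_validadd; infer_instance

-- ===== CLAIM (what is proved, stated in full; the proofs are below) =====
def Claim_equal_validadd : Prop := ∀ (addr : String), Dom_validadd addr → Spec_validadd addr (validadd addr)

-- ===== LEMMAS AND PROOFS =====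

-- the per-character test both sides ultimately use on the letter part
def qLet (c : Char) : Bool := decide ('A' ≤ c) && decide (c ≤ 'Z')

-- 'a in letters' is exactly the range test 'A' ≤ a ≤ 'Z'
theorem contains_lettersA (a : Char) :
    lettersA.contains a = (decide ('A' ≤ a) && decide (a ≤ 'Z')) := by
  by_cases h : 'A' ≤ a ∧ a ≤ 'Z'
  · obtain ⟨h1, h2⟩ := h
    have hn1 : 65 ≤ a.toNat := h1
    have hn2 : a.toNat ≤ 90 := h2
    have hofn := (Char.ofNat_toNat a).symm
    interval_cases h : a.toNat <;> (rw [hofn]; decide)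
  · rw [not_and_or] at h
    have hm : a ∉ lettersA := by
      intro hmem
      fin_cases hmem <;> exact h.elim (fun h' => h' (by decide)) (fun h' => h' (by decide))
    cases h with
    | inl h' => simp [List.contains_eq_mem, hm]; intro h2; exact absurd h2 h'
    | inr h' => simp [List.contains_eq_mem, hm]; intro _; exact not_le.mp h'

-- 'b in "0123456789"' (a one-char substring test) is exactly isdigit
theorem isIn_numbersA (b : Char) :
    PySem.Chars.isIn [b] numbersA = PySem.Chars.isdigit b := by
  by_cases h : '0' ≤ b ∧ b ≤ '9'
  · obtain ⟨h1, h2⟩ := h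
    have hn1 : 48 ≤ b.toNat := h1
    have hn2 : b.toNat ≤ 57 := h2
    have hofn := (Char.ofNat_toNat b).symm
    interval_cases h : b.toNat <;> (rw [hofn]; decide)
  · have hm : b ∉ numbersA := by
      intro hmem
      fin_cases hmem <;> exact h ⟨by decide, by decide⟩
    have hleft : PySem.Chars.isIn [b] numbersA = false := by
      rw [PySem.Chars.isIn_eq_false_iff]
      rw [List.singleton_infix_iff]
      exact hm
    have hright : PySem.Chars.isdigit b = false := by
      simp only [PySem.Chars.isdigit]
      rw [not_and_or] at h
      cases h with
      | inl h' => simp [h']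
      | inr h' => simp [h']
    rw [hleft, hright]

-- a letter is not a digit and vice versa ('9' < 'A')
theorem qLet_not_digit {c : Char} (h : qLet c = true) : PySem.Chars.isdigit c = false := by
  simp only [qLet, Bool.and_eq_true, decide_eq_true_eq] at h
  simp only [PySem.Chars.isdigit, Bool.and_eq_false_iff, decide_eq_false_iff_not, not_le]
  right
  exact lt_of_lt_of_le (by decide) h.1

theorem digit_not_qLet {c : Char} (h : PySem.Chars.isdigit c = true) : qLet c = false := by
  simp only [PySem.Chars.isdigit, Bool.and_eq_true, decide_eq_true_eq] at h
  simp only [qLet, Bool.and_eq_false_iff, decide_eq_false_iff_not, not_le]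
  left
  exact lt_of_le_of_lt h.2 (by decide)

-- upper() never leaves a lowercase ASCII letter
theorem islower_upperChar (c : Char) : PySem.Chars.islower (PySem.Chars.upperChar c) = false := by
  by_cases h : PySem.Chars.islower c = true
  · simp only [PySem.Chars.islower, Bool.and_eq_true, decide_eq_true_eq] at h
    have hn1 : 97 ≤ c.toNat := h.1
    have hn2 : c.toNat ≤ 122 := h.2
    have hofn := (Char.ofNat_toNat c).symm
    interval_cases hc : c.toNat <;> (rw [hofn]; decide)
  · simp only [PySem.Chars.upperChar, h]
    simpa using h

-- strip only removes characters
theorem mem_strip {c : Char} {l : List Char} (h : c ∈ PySem.Chars.strip l) : c ∈ l := by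
  simp only [PySem.Chars.strip, PySem.Chars.rstrip, PySem.Chars.lstrip, List.mem_reverse] at h
  have h1 := (List.dropWhile_sublist _).subset h
  rw [List.mem_reverse] at h1
  exact (List.dropWhile_sublist _).subset h1

-- on a string with no lowercase ASCII, isalpha coincides with the uppercase range test
theorem isalpha_eq_qLet {c : Char} (h : PySem.Chars.islower c = false) :
    PySem.Chars.isalpha c = qLet c := by
  simp only [PySem.Chars.isalpha, PySem.Chars.isupper, h, Bool.or_false, qLet]

def stepA (st : List Char × List Char × Bool) (a : Char) : List Char × List Char × Bool :=
  if lettersA.contains a && !st.2.2 then (st.1 ++ [a], st.2.1, st.2.2)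
  else (st.1, st.2.1 ++ [a], true)

-- once stop is set, everything goes to `right`
theorem foldl_stepA_stopped (u : List Char) (l r : List Char) :
    u.foldl stepA (l, r, true) = (l, r ++ u, true) := by
  induction u generalizing r with
  | nil => simp
  | cons c cs ih =>
      rw [List.foldl_cons, show stepA (l, r, true) c = (l, r ++ [c], true) by simp [stepA], ih]
      simp

-- before stop: left collects the leading letters, right the rest, stop records whether a nonletter was seen
theorem foldl_stepA_spec (u : List Char) (l r : List Char) :
    u.foldl stepA (l, r, false) =
      (l ++ u.takeWhile qLet, r ++ u.dropWhile qLet, !(u.dropWhile qLet).isEmpty) := by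
  induction u generalizing l r with
  | nil => simp
  | cons c cs ih =>
      by_cases hq : qLet c = true
      · have hcm : c ∈ lettersA := by
          have := contains_lettersA c
          simp only [qLet] at hq
          simpa [List.contains_eq_mem, hq] using this
        rw [List.foldl_cons, show stepA (l, r, false) c = (l ++ [c], r, false) by simp [stepA, hcm],
          ih, List.takeWhile_cons_of_pos hq, List.dropWhile_cons_of_pos hq]
        simp
      · have hcm : c ∉ lettersA := by
          have := contains_lettersA c
          simp only [qLet] at hq
          intro hmem
          rw [List.contains_eq_mem] at this
          simp [hmem] at this
          exact hq (by simp [this])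
        rw [List.foldl_cons, show stepA (l, r, false) c = (l, r ++ [c], true) by simp [stepA, hcm],
          foldl_stepA_stopped, List.takeWhile_cons_of_neg hq,
          List.dropWhile_cons_of_neg hq]
        simp

-- A's digit loop is an all-digits test threaded through the accumulator
theorem foldl_digits (r : List Char) (acc : Bool) :
    r.foldl (fun acc b => if !(PySem.Chars.isIn [b] numbersA) then false else acc) acc
      = (acc && r.all PySem.Chars.isdigit) := by
  induction r generalizing acc with
  | nil => simp
  | cons b bs ih =>
      rw [List.foldl_cons]
      rw [show PySem.Chars.isIn [b] numbersA = PySem.Chars.isdigit b from isIn_numbersA b]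
      by_cases hd : PySem.Chars.isdigit b = true
      · rw [show (if !PySem.Chars.isdigit b then false else acc) = acc by simp [hd], ih]
        simp [hd]
      · simp only [Bool.not_eq_true] at hd
        rw [show (if !PySem.Chars.isdigit b then false else acc) = false by simp [hd], ih]
        simp [hd]

-- when A accepts, B's rstrip recovers exactly A's letter prefix
theorem rdrop_eq_take (u : List Char)
    (h3 : (u.dropWhile qLet).all PySem.Chars.isdigit = true) :
    u.rdropWhile PySem.Chars.isdigit = u.takeWhile qLet := by
  conv_lhs => rw [← List.takeWhile_append_dropWhile (p := qLet) (l := u)]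
  rw [List.rdropWhile, List.reverse_append]
  rw [List.dropWhile_append]
  have hnil : (u.dropWhile qLet).reverse.dropWhile PySem.Chars.isdigit = [] := by
    rw [List.dropWhile_eq_nil_iff]
    intro x hx
    exact (List.all_eq_true.mp h3 x (List.mem_reverse.mp hx))
  rw [hnil]
  simp only [List.isEmpty_nil, if_true]
  cases hc : (u.takeWhile qLet).reverse with
  | nil => simpa using congrArg List.reverse hc
  | cons x xs =>
      have hx : qLet x = true := by
        have : x ∈ u.takeWhile qLet := by
          rw [← List.mem_reverse, hc]; exact List.mem_cons_self
        exact List.mem_takeWhile_imp this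
      rw [List.dropWhile_cons_of_neg (by simp [qLet_not_digit hx]), ← hc]
      simp

-- when B accepts, the string splits as (all-letter head) ++ (nonempty all-digit suffix)
theorem split_of_B (u : List Char)
    (hlo : ∀ c ∈ u, PySem.Chars.islower c = false)
    (h2 : (u.rdropWhile PySem.Chars.isdigit).length < u.length)
    (h3 : (u.rdropWhile PySem.Chars.isdigit).all PySem.Chars.isalpha = true) :
    u.takeWhile qLet = u.rdropWhile PySem.Chars.isdigit ∧
    u.dropWhile qLet = (u.reverse.takeWhile PySem.Chars.isdigit).reverse ∧
    (u.reverse.takeWhile PySem.Chars.isdigit).reverse ≠ [] := by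
  set H := u.rdropWhile PySem.Chars.isdigit with hH
  set S := (u.reverse.takeWhile PySem.Chars.isdigit).reverse with hS
  have hsplit : H ++ S = u := by
    rw [hH, hS, List.rdropWhile, ← List.reverse_append,
      List.takeWhile_append_dropWhile, List.reverse_reverse]
  have hSd : ∀ c ∈ S, PySem.Chars.isdigit c = true := by
    intro c hc
    exact List.mem_takeWhile_imp (List.mem_reverse.mp hc)
  have hSne : S ≠ [] := by
    intro hnil
    rw [hnil, List.append_nil] at hsplit
    rw [hsplit] at h2
    exact lt_irrefl _ h2
  have hHq : ∀ c ∈ H, qLet c = true := by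
    intro c hc
    have hca := List.all_eq_true.mp h3 c hc
    have hcu : c ∈ u := hsplit ▸ List.mem_append_left _ hc
    rw [← isalpha_eq_qLet (hlo c hcu)]
    exact hca
  constructor
  · conv_lhs => rw [← hsplit]
    rw [List.takeWhile_append]
    have hHt : H.takeWhile qLet = H := List.takeWhile_eq_self_iff.mpr hHq
    rw [if_pos (by rw [hHt])]
    cases hScases : S with
    | nil => exact absurd hScases hSne
    | cons x xs =>
        have hx : PySem.Chars.isdigit x = true := hSd x (hScases ▸ List.mem_cons_self)
        rw [List.takeWhile_cons_of_neg (by simp [digit_not_qLet hx]), List.append_nil]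
  · refine ⟨?_, hSne⟩
    conv_lhs => rw [← hsplit]
    rw [List.dropWhile_append]
    have hHd : H.dropWhile qLet = [] := List.dropWhile_eq_nil_iff.mpr hHq
    rw [hHd]
    simp only [List.isEmpty_nil, if_true]
    cases hScases : S with
    | nil => exact absurd hScases hSne
    | cons x xs =>
        have hx : PySem.Chars.isdigit x = true := hSd x (hScases ▸ List.mem_cons_self)
        rw [List.dropWhile_cons_of_neg (by simp [digit_not_qLet hx])]

-- ===== VERDICT (by name: the statement is the Claim_ definition above) =====
theorem validadd_spec : Claim_equal_validadd := by
  intro addr _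
  unfold Spec_validadd validadd validadd_alt
  set u := (PySem.Str.strip (PySem.Str.upper addr)).toList with hu
  have hlo : ∀ c ∈ u, PySem.Chars.islower c = false := by
    intro c hc
    rw [hu] at hc
    simp only [PySem.Str.toList_strip, PySem.Str.toList_upper] at hc
    have hc2 : c ∈ PySem.Chars.upper addr.toList := mem_strip hc
    simp only [PySem.Chars.upper, List.mem_map] at hc2
    obtain ⟨c', _, rfl⟩ := hc2
    exact islower_upperChar c'
  have hfold : u.foldl
      (fun (st : List Char × List Char × Bool) a =>
        if lettersA.contains a && !st.2.2 then (st.1 ++ [a], st.2.1, st.2.2)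
        else (st.1, st.2.1 ++ [a], true)) ([], [], false) = u.foldl stepA ([], [], false) := rfl
  simp only [hfold, foldl_stepA_spec u [] [], List.nil_append, foldl_digits]
  by_cases hA : (u.takeWhile qLet) ≠ [] ∧ (u.dropWhile qLet) ≠ [] ∧
      (u.dropWhile qLet).all PySem.Chars.isdigit = true
  · obtain ⟨h1, h2, h3⟩ := hA
    have hr := rdrop_eq_take u h3
    have hlen : (u.takeWhile qLet).length < u.length := by
      have := congrArg List.length (List.takeWhile_append_dropWhile (p := qLet) (l := u))
      rw [List.length_append] at this
      have h2l : 0 < (u.dropWhile qLet).length := List.length_pos_iff.mpr h2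
      omega
    have halpha : (u.takeWhile qLet).all PySem.Chars.isalpha = true := by
      rw [List.all_eq_true]
      intro c hc
      have hcu : c ∈ u := (List.takeWhile_sublist _).subset hc
      rw [isalpha_eq_qLet (hlo c hcu)]
      exact List.mem_takeWhile_imp hc
    rw [hr]
    simp [h1, h2, h3, hlen, halpha, List.length_pos_iff, PySem.Chars.strIsalpha,
      List.isEmpty_eq_false_iff]
  · by_cases hB : (u.rdropWhile PySem.Chars.isdigit) ≠ [] ∧
        (u.rdropWhile PySem.Chars.isdigit).length < u.length ∧
        (u.rdropWhile PySem.Chars.isdigit).all PySem.Chars.isalpha = true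
    · obtain ⟨b1, b2, b3⟩ := hB
      obtain ⟨e1, e2, e3⟩ := split_of_B u hlo b2 b3
      exfalso
      apply hA
      refine ⟨?_, ?_, ?_⟩
      · rw [e1]; exact b1
      · rw [e2]; exact e3
      · rw [e2, List.all_eq_true]
        intro c hc
        exact List.mem_takeWhile_imp (List.mem_reverse.mp hc)
    · -- both sides false
      push Not at hA hB
      have hAfalse :
          (decide (0 < (u.takeWhile qLet).length) &&
            (if ((u.dropWhile qLet).length == 0) = true then false
             else true && (u.dropWhile qLet).all PySem.Chars.isdigit)) = false := by
        by_cases ht : u.takeWhile qLet = []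
        · simp [ht]
        · have := hA ht
          by_cases hd : u.dropWhile qLet = []
          · simp [hd]
          · have h3f := this hd
            simp only [Bool.not_eq_true] at h3f
            simp [h3f, List.length_eq_zero_iff, hd]
      have hBfalse :
          (decide (0 < (u.rdropWhile PySem.Chars.isdigit).length) &&
            decide ((u.rdropWhile PySem.Chars.isdigit).length < u.length) &&
            PySem.Chars.strIsalpha (u.rdropWhile PySem.Chars.isdigit)) = false := by
        by_cases hb1 : u.rdropWhile PySem.Chars.isdigit = []
        · simp [hb1]
        · have := hB hb1
          by_cases hb2 : (u.rdropWhile PySem.Chars.isdigit).length < u.length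
          · have h3f := this hb2
            simp only [Bool.not_eq_true] at h3f
            simp [PySem.Chars.strIsalpha, h3f]
          · simp [hb2]
      rw [hAfalse, hBfalse]
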